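-- pv_equiv track=rewrite | github.com/HoYoung1/backjoon-Level | backjoon_level_python/1011.py | fly
-- ===== SOURCE A (Python) =====
-- def fly(x,y):
--     max_int = 2**32
--     pre_dist = [2]
--     import sys
--
--     for i in range(2, sys.maxsize):
--         num = pre_dist[-1] + i * 2
--         if num + i * 2 > 2 ** 31:
--             break
--         pre_dist.append(num)
--     for i in range(1, sys.maxsize):
--         if pre_dist[-1] > 2 ** 31:
--             break
--         pre_dist.append(i ** 2)
--
--     pre_dist.sort()
--
--     sub = y - x
--     rtn = None
--     for idx, item in enumerate(pre_dist):
--         if item >= sub: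
--             rtn = idx+1
--             break
--     return rtn
-- ===== SOURCE B (Python) =====
-- # Closed form for BOJ 1011: with s = isqrt(d-1), the answer is 2s if d <= s*s+s else 2s+1.
-- def _isqrt(n):
--     # integer square root by Newton's method (floor(sqrt(n)) for n >= 0)
--     x = n
--     y = (x + 1) // 2
--     while y < x:
--         x = y
--         y = (x + n // x) // 2
--     return x
--
-- def fly(x, y):
--     d = y - x
--     if d <= 1:
--         return 1
--     s = _isqrt(d - 1)
--     return 2 * s if d <= s * s + s else 2 * s + 1
-- ===== Notes on version B (the rewrite author's own statement) =====
-- stated objective: faster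
-- what changed: A builds a ~92680-entry table of k^2 and k(k+1) values, sorts it and linearly scans for the first entry >= y-x on every call; B computes the answer in O(1) from an integer square root (Newton's method): with s = isqrt(d-1), the answer is 2s if d <= s^2+s else 2s+1.
-- intended difference: For distances y-x greater than 46340*46341 (still reachable from valid BOJ-1011 inputs, whose distances go up to 2^31), A's precomputed table stops too early, so A returns a capped 92680 and, past 46341^2, None, while B's closed form returns the true minimal number of jumps (2s or 2s+1), which is the intended value. — e.g. on fly(0, 2147441941): A returns some 92680, B returns some 92681
import Mathlib
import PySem

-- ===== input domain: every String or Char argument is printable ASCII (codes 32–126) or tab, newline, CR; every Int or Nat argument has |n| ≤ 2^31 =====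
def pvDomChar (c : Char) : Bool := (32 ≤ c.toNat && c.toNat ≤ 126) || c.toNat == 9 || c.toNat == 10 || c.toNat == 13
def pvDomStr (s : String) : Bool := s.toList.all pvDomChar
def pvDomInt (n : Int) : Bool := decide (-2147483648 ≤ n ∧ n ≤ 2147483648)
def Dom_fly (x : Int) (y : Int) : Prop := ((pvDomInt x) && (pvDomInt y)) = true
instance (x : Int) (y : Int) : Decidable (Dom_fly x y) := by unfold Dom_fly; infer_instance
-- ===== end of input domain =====

-- B replaces A's build-a-92680-entry-table / sort / linear-scan with an O(1) closed form via an
-- integer square root; on distances above 46340*46341 A's truncated table returns a capped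
-- answer (then None) while B returns the true minimal number of jumps (see D_fly below).

-- ===== PORT A =====
-- pre_dist is kept in REVERSED order while it is built, so that Python's O(1) list.append and
-- pre_dist[-1] stay O(1) (cons / head); it is reversed back before .sort(), so the sorted list --
-- and everything after it -- is exactly Python's.  pre_dist is never empty, so headD 0 is exact.
def flyLast (pre : List Int) : Int := pre.headD 0

-- for i in range(2, sys.maxsize): ported as fuel recursion over the remaining iterations
-- (fuel = number of values left in the range); the loop always breaks long before the fuel runs out
def flyLoop1 (fuel : Nat) (i : Int) (pre : List Int) : List Int :=
  match fuel with
  | 0 => pre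
  | f + 1 =>
    let num := flyLast pre + i * 2
    if num + i * 2 > 2147483648 then pre
    else flyLoop1 f (i + 1) (num :: pre)

-- for i in range(1, sys.maxsize): same fuel scheme
def flyLoop2 (fuel : Nat) (i : Int) (pre : List Int) : List Int :=
  match fuel with
  | 0 => pre
  | f + 1 =>
    if flyLast pre > 2147483648 then pre
    else flyLoop2 f (i + 1) (i ^ 2 :: pre)

-- for idx, item in enumerate(pre_dist): if item >= sub: rtn = idx+1; break
def flyScan (lst : List Int) (sub : Int) (idx : Int) : Option Int :=
  match lst with
  | [] => none
  | item :: rest => if item ≥ sub then some (idx + 1) else flyScan rest sub (idx + 1)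

def fly (x : Int) (y : Int) : Option Int :=
  let pre1 := flyLoop1 9223372036854775805 2 [2]
  let pre2 := flyLoop2 9223372036854775806 1 pre1
  -- pre_dist.sort(): undo the reversal, then a stable sort (Lean's stable mergeSort = Python's sort)
  let pd := (pre2.reverse).mergeSort (fun a b => decide (a ≤ b))
  let sub := y - x
  flyScan pd sub 0

-- ===== PORT B =====
-- _isqrt's loop; all Python ints involved are nonnegative, so Nat's + / // coincide with Python's
def bNewtonLoop (n : Nat) (x : Nat) (y : Nat) : Nat :=
  if y < x then bNewtonLoop n y ((y + n / y) / 2) else x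
termination_by x

def bIsqrt (n : Nat) : Nat := bNewtonLoop n n ((n + 1) / 2)

def fly_alt (x : Int) (y : Int) : Option Int :=
  let d := y - x
  if d ≤ 1 then some 1
  else
    let s : Int := (bIsqrt (d - 1).toNat : Int)
    if d ≤ s * s + s then some (2 * s) else some (2 * s + 1)

-- ===== PRECONDITION & SPEC =====
-- For distances y - x greater than 46340*46341 (reachable from valid BOJ-1011 inputs, since the
-- problem allows distances up to 2^31), A's table stops too early and it returns a capped 92680 and
-- eventually None, while B's closed form returns the true minimal number of jumps — the intended value.
def D_fly (x : Int) (y : Int) : Prop := 46340 * 46341 < y - x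
instance (x : Int) (y : Int) : Decidable (D_fly x y) := by unfold D_fly; infer_instance

def Spec_fly (x : Int) (y : Int) (out : Option Int) : Prop := ¬ D_fly x y → out = fly_alt x y
instance (x : Int) (y : Int) (out : Option Int) : Decidable (Spec_fly x y out) := by unfold Spec_fly; infer_instance

def pvDiffWitness_fly : Int × Int := (0, 2147441941)
def pvDiffWitnessOut_fly : (Option Int) × (Option Int) := (some 92680, some 92681)

-- ===== CLAIM (what is proved, stated in full; the proofs are below) =====
def Claim_unchanged_fly : Prop := ∀ (x : Int) (y : Int), Dom_fly x y → Spec_fly x y (fly x y)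
def Claim_changed_fly : Prop := Dom_fly (pvDiffWitness_fly.1) (pvDiffWitness_fly.2) ∧ D_fly (pvDiffWitness_fly.1) (pvDiffWitness_fly.2) ∧ fly (pvDiffWitness_fly.1) (pvDiffWitness_fly.2) = pvDiffWitnessOut_fly.1 ∧ fly_alt (pvDiffWitness_fly.1) (pvDiffWitness_fly.2) = pvDiffWitnessOut_fly.2 ∧ pvDiffWitnessOut_fly.1 ≠ pvDiffWitnessOut_fly.2
def Claim_exact_fly : Prop := ∀ (x : Int) (y : Int), Dom_fly x y → D_fly x y → fly x y ≠ fly_alt x y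

-- ===== LEMMAS AND PROOFS =====

-- the multiset A's two loops build: oblongs k(k+1), k = 1..46339, then squares k^2, k = 1..46341
def oblist : List Int := (List.range' 1 46339).map (fun k : Nat => (k : Int) * ((k : Int) + 1))
def sqlist : List Int := (List.range' 1 46341).map (fun k : Nat => (k : Int) * (k : Int))

-- B's Newton loop is Lean core's Nat.sqrt iteration
theorem bNewtonLoop_eq_iter (x : Nat) : ∀ n, bNewtonLoop n x ((x + n / x) / 2) = Nat.sqrt.iter n x := by
  induction x using Nat.strong_induction_on with
  | _ x ih =>
    intro n
    rw [bNewtonLoop, Nat.sqrt.iter]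
    by_cases h : (x + n / x) / 2 < x
    · rw [if_pos h, dif_pos h]
      exact ih _ h n
    · rw [if_neg h, dif_neg h]

theorem bIsqrt_eq_iter (n : Nat) (h : 1 ≤ n) : bIsqrt n = Nat.sqrt.iter n n := by
  unfold bIsqrt
  have hd : (n + 1) / 2 = (n + n / n) / 2 := by rw [Nat.div_self h]
  rw [hd, bNewtonLoop_eq_iter]

theorem bIsqrt_zero : bIsqrt 0 = 0 := by
  rw [bIsqrt, bNewtonLoop]
  norm_num

theorem bIsqrt_le (n : Nat) : bIsqrt n * bIsqrt n ≤ n := by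
  rcases Nat.eq_zero_or_pos n with rfl | h
  · rw [bIsqrt_zero]
  · rw [bIsqrt_eq_iter n h]
    exact Nat.sqrt.iter_sq_le n n

theorem lt_bIsqrt_succ (n : Nat) : n < (bIsqrt n + 1) * (bIsqrt n + 1) := by
  rcases Nat.eq_zero_or_pos n with rfl | h
  · rw [bIsqrt_zero]; norm_num
  · rw [bIsqrt_eq_iter n h]
    exact Nat.sqrt.lt_iter_succ_sq n n (by nlinarith)

theorem countP_range'_min (n m : Nat) (p : Nat → Bool)
    (h : ∀ k, 1 ≤ k → k ≤ n → (p k = true ↔ k ≤ m)) :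
    (List.range' 1 n).countP p = min n m := by
  induction n with
  | zero => simp
  | succ n ih =>
    rw [List.range'_concat, List.countP_append]
    rw [ih (fun k h1 h2 => h k h1 (by omega))]
    have hone : (List.countP p [1 + 1 * n]) = if p (1 + n) then 1 else 0 := by
      simp [List.countP_cons]
    rw [hone]
    have hp := h (1 + n) (by omega) (by omega)
    by_cases hle : 1 + n ≤ m
    · rw [if_pos (hp.2 hle)]; omega
    · have hfalse : p (1 + n) = false := by
        cases hpn : p (1 + n)
        · rfl
        · exact absurd (hp.1 hpn) hle
      rw [hfalse]; simp; omega

theorem loop1_spec (f : Nat) : ∀ (i : Int) (pre : List Int), 2 ≤ i → i ≤ 46340 →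
    (46340 : Int) - i ≤ (f : Int) → flyLast pre = (i - 1) * i →
    flyLoop1 f i pre = ((List.range' i.toNat (46340 - i).toNat).map
      (fun k : Nat => (k : Int) * ((k : Int) + 1))).reverse ++ pre := by
  induction f with
  | zero =>
    intro i pre h2 h4 hf hlast
    have : i = 46340 := by simp at hf; omega
    subst this
    simp [flyLoop1]
  | succ f ih =>
    intro i pre h2 h4 hf hlast
    simp only [flyLoop1]
    rw [hlast]
    by_cases hle : i ≤ 46339
    · rw [if_neg (by nlinarith)]
      rw [ih (i + 1) (((i - 1) * i + i * 2) :: pre) (by omega) (by omega)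
        (by push_cast at hf ⊢; omega)
        (by rw [flyLast, List.headD_cons]; ring)]
      have hn : (46340 - i).toNat = (46340 - (i + 1)).toNat + 1 := by omega
      have hi : (i + 1).toNat = i.toNat + 1 := by omega
      rw [hn, List.range'_succ, List.map_cons, List.reverse_cons, hi, List.append_assoc]
      have hc : ((i.toNat : Int)) = i := Int.toNat_of_nonneg (by omega)
      congr 1
      simp only [List.singleton_append, List.cons.injEq]
      exact ⟨by rw [hc]; ring, trivial⟩
    · have : i = 46340 := by omega
      subst this
      rw [if_pos (by norm_num)]
      simp

theorem loop2_spec (f : Nat) : ∀ (i : Int) (pre : List Int), 1 ≤ i → i ≤ 46342 →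
    (46342 : Int) - i ≤ (f : Int) →
    flyLast pre = (if i = 1 then 2147349260 else (i - 1) * (i - 1)) →
    flyLoop2 f i pre = ((List.range' i.toNat (46342 - i).toNat).map
      (fun k : Nat => (k : Int) * (k : Int))).reverse ++ pre := by
  induction f with
  | zero =>
    intro i pre h1 h4 hf hlast
    have : i = 46342 := by simp at hf; omega
    subst this
    simp [flyLoop2]
  | succ f ih =>
    intro i pre h1 h4 hf hlast
    simp only [flyLoop2]
    rw [hlast]
    by_cases hle : i ≤ 46341
    · have hsmall : (if i = 1 then (2147349260 : Int) else (i - 1) * (i - 1)) ≤ 2147483648 := by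
        split
        · norm_num
        · nlinarith
      rw [if_neg (by omega)]
      rw [ih (i + 1) (i ^ 2 :: pre) (by omega) (by omega)
        (by push_cast at hf ⊢; omega)
        (by rw [flyLast, List.headD_cons, if_neg (by omega)]; ring)]
      have hn : (46342 - i).toNat = (46342 - (i + 1)).toNat + 1 := by omega
      have hi : (i + 1).toNat = i.toNat + 1 := by omega
      rw [hn, List.range'_succ, List.map_cons, List.reverse_cons, hi, List.append_assoc]
      have hc : ((i.toNat : Int)) = i := Int.toNat_of_nonneg (by omega)
      congr 1
      simp only [List.singleton_append, List.cons.injEq]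
      exact ⟨by rw [hc]; ring, trivial⟩
    · have : i = 46342 := by omega
      subst this
      rw [if_pos (by norm_num)]
      simp

theorem oblist_eq : oblist = [2] ++ (List.range' 2 46338).map
    (fun k : Nat => (k : Int) * ((k : Int) + 1)) := by
  unfold oblist
  rw [show (46339 : Nat) = 46338 + 1 from rfl, List.range'_succ]
  norm_num

theorem headD_oblist_rev : flyLast oblist.reverse = 2147349260 := by
  unfold oblist flyLast
  rw [show (46339 : Nat) = 46338 + 1 from rfl, List.range'_concat, List.map_append,
    List.reverse_append]
  simp only [List.map_cons, List.map_nil, List.reverse_cons, List.reverse_nil, List.nil_append]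
  norm_num

theorem fly_eq_scan (x y : Int) :
    fly x y = flyScan ((oblist ++ sqlist).mergeSort (fun a b => decide (a ≤ b))) (y - x) 0 := by
  have step : fly x y = flyScan (((flyLoop2 9223372036854775806 1
      (flyLoop1 9223372036854775805 2 [2])).reverse).mergeSort (fun a b => decide (a ≤ b)))
      (y - x) 0 := rfl
  rw [step]
  rw [loop1_spec _ 2 [2] (by norm_num) (by norm_num) (by norm_num)
    (by simp [flyLast])]
  have hr1 : ((46340 : Int) - 2).toNat = 46338 := by decide
  have hr2 : ((2 : Int)).toNat = 2 := by decide
  rw [hr1, hr2]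
  have hpre1 : ((List.range' 2 46338).map
      (fun k : Nat => (k : Int) * ((k : Int) + 1))).reverse ++ [2] = oblist.reverse := by
    rw [oblist_eq, List.reverse_append]
    rfl
  rw [hpre1]
  rw [loop2_spec _ 1 oblist.reverse (by norm_num) (by norm_num) (by norm_num)
    (by rw [if_pos rfl]; exact headD_oblist_rev)]
  have hr3 : ((46342 : Int) - 1).toNat = 46341 := by decide
  have hr4 : ((1 : Int)).toNat = 1 := by decide
  rw [hr3, hr4]
  have hrev : ((List.range' 1 46341).map (fun k : Nat => (k : Int) * (k : Int))).reverse ++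
      oblist.reverse = (oblist ++ sqlist).reverse := by
    rw [List.reverse_append]
    rfl
  rw [hrev, List.reverse_reverse]

theorem flyScan_some : ∀ (L : List Int) (d i : Int), L.Pairwise (· ≤ ·) → (∃ z ∈ L, d ≤ z) →
    flyScan L d i = some (i + (L.countP (fun z => decide (z < d)) : Int) + 1) := by
  intro L
  induction L with
  | nil => intro d i _ hex; simp at hex
  | cons h t ih =>
    intro d i hpw hex
    simp only [flyScan]
    by_cases hge : h ≥ d
    · rw [if_pos hge]
      have h0 : (h :: t).countP (fun z => decide (z < d)) = 0 := by
        rw [List.countP_eq_zero]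
        intro z hz
        simp only [decide_eq_true_eq]
        rcases List.mem_cons.1 hz with rfl | hz
        · omega
        · have := (List.pairwise_cons.1 hpw).1 z hz
          omega
      rw [h0]; norm_num
    · rw [if_neg hge]
      have hcount : (h :: t).countP (fun z => decide (z < d)) = t.countP (fun z => decide (z < d)) + 1 := by
        rw [List.countP_cons]
        simp only [decide_eq_true_eq]
        rw [if_pos (by omega)]
      have hex' : ∃ z ∈ t, d ≤ z := by
        obtain ⟨z, hz, hdz⟩ := hex
        rcases List.mem_cons.1 hz with rfl | hz
        · omega
        · exact ⟨z, hz, hdz⟩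
      rw [ih d (i+1) (List.pairwise_cons.1 hpw).2 hex', hcount]
      push_cast; ring_nf

theorem flyScan_none : ∀ (L : List Int) (d i : Int), (∀ z ∈ L, z < d) → flyScan L d i = none := by
  intro L
  induction L with
  | nil => intro d i _; rfl
  | cons h t ih =>
    intro d i hall
    have hh : h < d := hall h (by simp)
    simp only [flyScan]
    rw [if_neg (by omega)]
    exact ih d (i+1) (fun z hz => hall z (by simp [hz]))

theorem mem_pre_bounds : ∀ z ∈ oblist ++ sqlist, (1 : Int) ≤ z ∧ z ≤ 2147488281 := by
  intro z hz
  rcases List.mem_append.1 hz with hz | hz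
  · obtain ⟨k, hk, rfl⟩ := List.mem_map.1 hz
    obtain ⟨hk1, hk2⟩ := List.mem_range'_1.1 hk
    have h1 : (1 : Int) ≤ (k : Int) := by exact_mod_cast hk1
    have h2 : (k : Int) ≤ 46339 := by exact_mod_cast (by omega : k ≤ 46339)
    constructor <;> nlinarith
  · obtain ⟨k, hk, rfl⟩ := List.mem_map.1 hz
    obtain ⟨hk1, hk2⟩ := List.mem_range'_1.1 hk
    have h1 : (1 : Int) ≤ (k : Int) := by exact_mod_cast hk1
    have h2 : (k : Int) ≤ 46341 := by exact_mod_cast (by omega : k ≤ 46341)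
    constructor <;> nlinarith

theorem big_mem : (2147488281 : Int) ∈ oblist ++ sqlist := by
  apply List.mem_append.2
  right
  unfold sqlist
  apply List.mem_map.2
  refine ⟨46341, List.mem_range'_1.2 (by omega), by norm_num⟩

theorem countP_pre (d : Int) (mob msq : Nat)
    (hob : ∀ k : Nat, 1 ≤ k → k ≤ 46339 → (((k : Int) * ((k : Int) + 1) < d) ↔ k ≤ mob))
    (hsq : ∀ k : Nat, 1 ≤ k → k ≤ 46341 → (((k : Int) * (k : Int) < d) ↔ k ≤ msq)) :
    (oblist ++ sqlist).countP (fun z => decide (z < d)) = min 46339 mob + min 46341 msq := by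
  unfold oblist sqlist
  rw [List.countP_append, List.countP_map, List.countP_map]
  rw [countP_range'_min 46339 mob _ (fun k h1 h2 => by
    simpa using hob k h1 h2)]
  rw [countP_range'_min 46341 msq _ (fun k h1 h2 => by
    simpa using hsq k h1 h2)]

theorem mergeSort_pre_pairwise :
    ((oblist ++ sqlist).mergeSort (fun a b => decide (a ≤ b))).Pairwise (· ≤ ·) := by
  have := List.pairwise_mergeSort (le := fun a b : Int => decide (a ≤ b))
    (fun a b c hab hbc => by simp only [decide_eq_true_eq] at *; omega)
    (fun a b => by simp only [Bool.or_eq_true, decide_eq_true_eq]; omega)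
    (oblist ++ sqlist)
  exact this.imp (by simp)

theorem fly_scan_count (x y : Int) (h : y - x ≤ 2147488281) :
    fly x y = some (((oblist ++ sqlist).countP (fun z => decide (z < y - x)) : Int) + 1) := by
  rw [fly_eq_scan]
  have hperm := List.mergeSort_perm (oblist ++ sqlist) (fun a b => decide (a ≤ b))
  have hex : ∃ z ∈ (oblist ++ sqlist).mergeSort (fun a b => decide (a ≤ b)), y - x ≤ z :=
    ⟨2147488281, hperm.mem_iff.2 big_mem, h⟩
  rw [flyScan_some _ _ _ mergeSort_pre_pairwise hex, hperm.countP_eq]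
  norm_num

-- unfold B's definition into the plain if-expression
theorem fly_alt_eq (x y : Int) :
    fly_alt x y = if y - x ≤ 1 then some 1
      else if y - x ≤ (bIsqrt ((y - x) - 1).toNat : Int) * (bIsqrt ((y - x) - 1).toNat : Int)
        + (bIsqrt ((y - x) - 1).toNat : Int)
        then some (2 * (bIsqrt ((y - x) - 1).toNat : Int))
        else some (2 * (bIsqrt ((y - x) - 1).toNat : Int) + 1) := rfl

theorem isqrt_facts (d : Int) (h2 : 2 ≤ d) :
    (bIsqrt (d - 1).toNat : Int) * (bIsqrt (d - 1).toNat : Int) ≤ d - 1 ∧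
    d - 1 < ((bIsqrt (d - 1).toNat : Int) + 1) * ((bIsqrt (d - 1).toNat : Int) + 1) := by
  have hd : ((d - 1).toNat : Int) = d - 1 := Int.toNat_of_nonneg (by omega)
  constructor
  · have := bIsqrt_le (d - 1).toNat
    have : ((bIsqrt (d - 1).toNat * bIsqrt (d - 1).toNat : Nat) : Int) ≤ ((d - 1).toNat : Int) := by
      exact_mod_cast this
    push_cast at this
    omega
  · have := lt_bIsqrt_succ (d - 1).toNat
    have : ((d - 1).toNat : Int) < ((bIsqrt (d - 1).toNat + 1) * (bIsqrt (d - 1).toNat + 1) : Nat) := by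
      exact_mod_cast this
    push_cast at this
    omega

theorem fly_low (x y : Int) (h : y - x ≤ 46340 * 46341) : fly x y = fly_alt x y := by
  rw [fly_scan_count x y (by omega), fly_alt_eq]
  by_cases hd1 : y - x ≤ 1
  · rw [if_pos hd1]
    have h0 : (oblist ++ sqlist).countP (fun z => decide (z < y - x)) = 0 := by
      rw [List.countP_eq_zero]
      intro z hz
      have := mem_pre_bounds z hz
      simp only [decide_eq_true_eq]
      omega
    rw [h0]
    norm_num
  · rw [if_neg hd1]
    have h2 : 2 ≤ y - x := by omega
    set d := y - x with hdd
    set s : Int := (bIsqrt (d - 1).toNat : Int) with hs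
    obtain ⟨hs1, hs2⟩ := isqrt_facts d h2
    rw [← hs] at hs1 hs2
    have hs0 : 0 ≤ s := by positivity
    have hstn : ((s.toNat : Int)) = s := Int.toNat_of_nonneg hs0
    have hsub : s ≤ 46340 := by nlinarith
    have hsqiff : ∀ k : Nat, 1 ≤ k → k ≤ 46341 → (((k : Int) * (k : Int) < d) ↔ k ≤ s.toNat) := by
      intro k hk1 hk2
      constructor
      · intro hlt
        by_contra hgt
        have : s + 1 ≤ (k : Int) := by omega
        nlinarith
      · intro hle
        have : (k : Int) ≤ s := by omega
        have h1 : (1 : Int) ≤ (k : Int) := by exact_mod_cast hk1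
        nlinarith
    by_cases hbig : y - x ≤ s * s + s
    · rw [if_pos hbig]
      rw [← hdd] at hbig
      have hs1' : 1 ≤ s := by nlinarith
      have hobiff : ∀ k : Nat, 1 ≤ k → k ≤ 46339 →
          (((k : Int) * ((k : Int) + 1) < d) ↔ k ≤ s.toNat - 1) := by
        intro k hk1 hk2
        have h1 : (1 : Int) ≤ (k : Int) := by exact_mod_cast hk1
        constructor
        · intro hlt
          by_contra hgt
          have : s ≤ (k : Int) := by omega
          nlinarith
        · intro hle
          have : (k : Int) ≤ s - 1 := by omega
          nlinarith
      rw [countP_pre d (s.toNat - 1) s.toNat hobiff hsqiff]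
      have hm1 : min 46339 (s.toNat - 1) = s.toNat - 1 := by omega
      have hm2 : min 46341 s.toNat = s.toNat := by omega
      rw [hm1, hm2]
      have : 1 ≤ s.toNat := by omega
      congr 1
      push_cast [this]
      omega
    · rw [if_neg hbig]
      rw [← hdd] at hbig
      have hlt : s * s + s < d := by omega
      have hs46339 : s ≤ 46339 := by nlinarith
      have hobiff : ∀ k : Nat, 1 ≤ k → k ≤ 46339 →
          (((k : Int) * ((k : Int) + 1) < d) ↔ k ≤ s.toNat) := by
        intro k hk1 hk2
        have h1 : (1 : Int) ≤ (k : Int) := by exact_mod_cast hk1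
        constructor
        · intro hlt'
          by_contra hgt
          have : s + 1 ≤ (k : Int) := by omega
          nlinarith
        · intro hle
          have : (k : Int) ≤ s := by omega
          nlinarith
      rw [countP_pre d s.toNat s.toNat hobiff hsqiff]
      have hm1 : min 46339 s.toNat = s.toNat := by omega
      have hm2 : min 46341 s.toNat = s.toNat := by omega
      rw [hm1, hm2]
      congr 1
      push_cast
      omega

theorem fly_mid (x y : Int) (h1 : 46340 * 46341 < y - x) (h2 : y - x ≤ 2147488281) :
    fly x y = some 92680 ∧ fly_alt x y = some 92681 := by
  constructor
  · rw [fly_scan_count x y h2]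
    have hobiff : ∀ k : Nat, 1 ≤ k → k ≤ 46339 →
        (((k : Int) * ((k : Int) + 1) < y - x) ↔ k ≤ 46339) := by
      intro k hk1 hk2
      have h1' : (1 : Int) ≤ (k : Int) := by exact_mod_cast hk1
      have h2' : (k : Int) ≤ 46339 := by exact_mod_cast hk2
      constructor
      · intro _; exact hk2
      · intro _; nlinarith
    have hsqiff : ∀ k : Nat, 1 ≤ k → k ≤ 46341 →
        (((k : Int) * (k : Int) < y - x) ↔ k ≤ 46340) := by
      intro k hk1 hk2
      have h1' : (1 : Int) ≤ (k : Int) := by exact_mod_cast hk1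
      have h2' : (k : Int) ≤ 46341 := by exact_mod_cast hk2
      constructor
      · intro hlt
        by_contra hgt
        have hk : (46341 : Int) ≤ (k : Int) := by exact_mod_cast (by omega : 46341 ≤ k)
        nlinarith
      · intro hle
        have : (k : Int) ≤ 46340 := by exact_mod_cast hle
        nlinarith
    rw [countP_pre (y - x) 46339 46340 hobiff hsqiff]
    norm_num
  · rw [fly_alt_eq]
    rw [if_neg (by omega)]
    set s : Int := (bIsqrt ((y - x) - 1).toNat : Int) with hs
    obtain ⟨hs1, hs2⟩ := isqrt_facts (y - x) (by omega)
    rw [← hs] at hs1 hs2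
    have hs0 : 0 ≤ s := by positivity
    have hle : s ≤ 46340 := by nlinarith
    have hge : 46340 ≤ s := by nlinarith
    have hseq : s = 46340 := le_antisymm hle hge
    rw [hseq]
    rw [if_neg (by norm_num; omega)]
    norm_num

theorem fly_high (x y : Int) (h : 2147488281 < y - x) : fly x y = none := by
  rw [fly_eq_scan]
  apply flyScan_none
  intro z hz
  have hperm := List.mergeSort_perm (oblist ++ sqlist) (fun a b => decide (a ≤ b))
  have := mem_pre_bounds z (hperm.mem_iff.1 hz)
  omega

theorem fly_alt_isSome (x y : Int) : (fly_alt x y).isSome := by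
  rw [fly_alt_eq]
  split
  · rfl
  · split <;> rfl

-- ===== VERDICT (by name: the statement is the Claim_ definition above) =====
theorem fly_spec : Claim_unchanged_fly := by
  intro x y _ hD
  exact fly_low x y (by unfold D_fly at hD; omega)

theorem fly_changed : Claim_changed_fly := by
  unfold Claim_changed_fly
  refine ⟨by decide, by decide, ?_, ?_, by decide⟩
  · exact (fly_mid 0 2147441941 (by norm_num) (by norm_num)).1
  · exact (fly_mid 0 2147441941 (by norm_num) (by norm_num)).2

theorem fly_tight : Claim_exact_fly := by
  intro x y _ hD
  unfold D_fly at hD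
  by_cases h2 : y - x ≤ 2147488281
  · obtain ⟨ha, hb⟩ := fly_mid x y hD h2
    rw [ha, hb]; decide
  · rw [fly_high x y (by omega)]
    intro h
    have := fly_alt_isSome x y
    rw [← h] at this
    simp at this
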